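-- pv_equiv track=rewrite | github.com/hugocondesa-debug/sonar-engine | src/sonar/pipelines/daily_monetary_indices.py | _classify_m4_compute_mode
-- ===== SOURCE A (Python) =====
-- def _classify_m4_compute_mode(flags: tuple[str, ...]) -> str:
--     """Return ``"FULL"`` / ``"SCAFFOLD"`` / ``"CANONICAL"`` per Sprint J flag contract.
--
--     Mirrors :func:`_classify_m2_compute_mode` but for the M4 FCI axis.
--     M4 has strict semantics: the compute-side enforces
--     ``MIN_CUSTOM_COMPONENTS = 5`` so the partial bucket is absent by
--     construction — a sub-5 country is either a SCAFFOLD (builder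
--     raised ``InsufficientDataError``) or absent entirely from the
--     ``results.m4`` slot.
--
--     - ``FULL``: any flag ending ``_M4_FULL_COMPUTE_LIVE`` (Sprint J
--       EA-proxy tier — EA aggregate + DE/FR/IT/ES/NL/PT).
--     - ``SCAFFOLD``: any flag ending ``_M4_SCAFFOLD_ONLY`` (emitted by
--       builders that compose partial inputs but the compute side will
--       still reject; included for observability symmetry).
--     - ``CANONICAL``: none of the Sprint J flags present. Covers the
--       US NFCI direct-provider path (spec §4 step 1 short-circuit)
--       and any future builder that predates Sprint J.
--     """
--     for flag in flags:
--         if flag.endswith("_M4_FULL_COMPUTE_LIVE"):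
--             return "FULL"
--     for flag in flags:
--         if flag.endswith("_M4_SCAFFOLD_ONLY"):
--             return "SCAFFOLD"
--     return "CANONICAL"
-- ===== SOURCE B (Python) =====
-- def _classify_m4_compute_mode(flags: tuple[str, ...]) -> str:
--     scaffold_seen = False
--     for flag in flags:
--         if flag.endswith("_M4_FULL_COMPUTE_LIVE"):
--             return "FULL"
--         if flag.endswith("_M4_SCAFFOLD_ONLY"):
--             scaffold_seen = True
--     return "SCAFFOLD" if scaffold_seen else "CANONICAL"
-- ===== Notes on version B (the rewrite author's own statement) =====
-- stated objective: simpler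
-- what changed: Two sequential scans over flags are replaced by one single pass maintaining a scaffold_seen boolean; FULL still wins by returning immediately inside the loop.
import Mathlib
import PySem

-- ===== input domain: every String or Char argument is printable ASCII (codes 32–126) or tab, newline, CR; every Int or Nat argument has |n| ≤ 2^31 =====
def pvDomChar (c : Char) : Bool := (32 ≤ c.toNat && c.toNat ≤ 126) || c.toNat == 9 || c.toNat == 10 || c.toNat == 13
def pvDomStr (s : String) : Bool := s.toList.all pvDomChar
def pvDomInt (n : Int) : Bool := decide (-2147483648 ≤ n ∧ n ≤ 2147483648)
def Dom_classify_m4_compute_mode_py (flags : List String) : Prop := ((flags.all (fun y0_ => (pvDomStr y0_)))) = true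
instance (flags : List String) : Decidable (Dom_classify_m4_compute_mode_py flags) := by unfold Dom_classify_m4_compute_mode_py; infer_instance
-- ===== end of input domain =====

-- B replaces A's two sequential scans with a single pass carrying a scaffold_seen flag (same result, one traversal).


-- ===== PORT A =====
-- first loop of A: early-return "FULL" on any flag ending "_M4_FULL_COMPUTE_LIVE"
def pvALoop1 : List String → Option String
  | [] => none
  | f :: rest =>
    if PySem.Str.endswith f "_M4_FULL_COMPUTE_LIVE" then some "FULL" else pvALoop1 rest

-- second loop of A: early-return "SCAFFOLD" on any flag ending "_M4_SCAFFOLD_ONLY"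
def pvALoop2 : List String → Option String
  | [] => none
  | f :: rest =>
    if PySem.Str.endswith f "_M4_SCAFFOLD_ONLY" then some "SCAFFOLD" else pvALoop2 rest

def classify_m4_compute_mode_py (flags : List String) : String :=
  match pvALoop1 flags with
  | some r => r
  | none =>
    match pvALoop2 flags with
    | some r => r
    | none => "CANONICAL"

-- ===== PORT B =====
-- B: single pass with a scaffold_seen accumulator
def pvBLoop : List String → Bool → String
  | [], seen => if seen then "SCAFFOLD" else "CANONICAL"
  | f :: rest, seen =>
    if PySem.Str.endswith f "_M4_FULL_COMPUTE_LIVE" then "FULL"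
    else pvBLoop rest (seen || PySem.Str.endswith f "_M4_SCAFFOLD_ONLY")

def classify_m4_compute_mode_py_alt (flags : List String) : String :=
  pvBLoop flags false

-- ===== PRECONDITION & SPEC =====
def Spec_classify_m4_compute_mode_py (flags : List String) (out : String) : Prop := out = classify_m4_compute_mode_py_alt flags
instance (flags : List String) (out : String) : Decidable (Spec_classify_m4_compute_mode_py flags out) := by unfold Spec_classify_m4_compute_mode_py; infer_instance

-- ===== CLAIM (what is proved, stated in full; the proofs are below) =====
def Claim_equal_classify_m4_compute_mode_py : Prop := ∀ (flags : List String), Dom_classify_m4_compute_mode_py flags → Spec_classify_m4_compute_mode_py flags (classify_m4_compute_mode_py flags)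

-- ===== LEMMAS AND PROOFS =====

-- ===== VERDICT (by name: the statement is the Claim_ definition above) =====
theorem pvGetD_ite {α : Type} (c : Prop) [Decidable c] (a : α) (o : Option α) (d : α) :
    (if c then some a else o).getD d = if c then a else o.getD d := by
  split_ifs <;> rfl

theorem pvIte_or {α : Type} (a b : Bool) (x y : α) :
    (if (a || b) = true then x else y) = if a = true then x else if b = true then x else y := by
  cases a <;> cases b <;> simp

theorem pvBLoop_char : ∀ (flags : List String) (seen : Bool),
    pvBLoop flags seen =
      (pvALoop1 flags).getD
        (if seen then "SCAFFOLD" else (pvALoop2 flags).getD "CANONICAL") := by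
  intro flags
  induction flags with
  | nil => intro seen; cases seen <;> simp [pvBLoop, pvALoop1, pvALoop2]
  | cons f rest ih =>
    intro seen
    simp only [pvBLoop, pvALoop1, pvALoop2, ih, pvGetD_ite, pvIte_or]

theorem classify_m4_compute_mode_py_spec : Claim_equal_classify_m4_compute_mode_py := by
  intro flags _
  unfold Spec_classify_m4_compute_mode_py classify_m4_compute_mode_py classify_m4_compute_mode_py_alt
  rw [pvBLoop_char]
  cases h1 : pvALoop1 flags <;> cases h2 : pvALoop2 flags <;> simp
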